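-- pv_equiv track=rewrite | github.com/gustavoguedess/advent-of-code-2023 | day14/part1.py | count_loads
-- ===== SOURCE A (Python) =====
-- def count_loads(platform):
--     floor = [0] * len(platform[0])
--
--     loads = 0
--     for i in range(len(platform)):
--         for j in range(len(platform[0])):
--             if platform[i][j] == 'O':
--                 loads += (len(platform) - floor[j])
--                 floor[j] += 1
--             if platform[i][j] == '#':
--                 floor[j] = i+1
--     return loads
-- ===== SOURCE B (Python) =====
-- def count_loads(platform):
--     rows = len(platform)
--     cols = len(platform[0])
--     total = 0
--     for j in range(cols):
--         start = 0   # top row of the current free segment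
--         c = 0       # 'O' rocks seen in the segment so far
--         for i in range(rows):
--             ch = platform[i][j]
--             if ch == 'O':
--                 c += 1
--             elif ch == '#':
--                 total += c * rows - c * start - c * (c - 1) // 2
--                 start = i + 1
--                 c = 0
--         total += c * rows - c * start - c * (c - 1) // 2
--     return total
-- ===== Notes on version B (the rewrite author's own statement) =====
-- stated objective: alternative
-- what changed: B iterates column by column and adds a closed-form load c*rows - c*start - c*(c-1)//2 per free segment at each '#' (and at column end), instead of A's row-major scan that maintains a per-column floor array and adds one term per rock.
import Mathlib
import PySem

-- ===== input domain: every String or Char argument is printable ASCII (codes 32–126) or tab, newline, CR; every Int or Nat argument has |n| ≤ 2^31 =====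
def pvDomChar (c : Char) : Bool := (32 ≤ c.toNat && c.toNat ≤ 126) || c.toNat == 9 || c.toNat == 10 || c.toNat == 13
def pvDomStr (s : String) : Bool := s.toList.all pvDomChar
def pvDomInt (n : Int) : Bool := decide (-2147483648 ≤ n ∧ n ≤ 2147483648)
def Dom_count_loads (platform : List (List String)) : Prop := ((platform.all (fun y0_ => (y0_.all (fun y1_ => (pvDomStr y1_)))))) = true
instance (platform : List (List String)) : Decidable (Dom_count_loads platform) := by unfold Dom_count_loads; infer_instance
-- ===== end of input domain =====

-- B replaces A's row-major scan (floor array, one addition per rock) by a column-major scan that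
-- flushes each free segment with a closed-form load; same cost, different decomposition (objective: alternative).

-- ===== PORT A =====
-- platform[i][j] (and platform[0]) via pyGetD with a default: in range for every input admitted by Pre_.
def pvCell (row : List String) (j : Int) : String := PySem.List.pyGetD row j ""

-- the inner `for j in range(len(platform[0]))` loop of A, for one row p = (i, platform[i])
def pvRowBody (rows : Int) (cols : Nat) (st : List Int × Int) (p : Int × List String) : List Int × Int :=
  (PySem.List.pyRange 0 (cols : Int)).foldl
    (fun st j =>
      let ch := pvCell p.2 j
      let st1 := if ch = "O"
        then (PySem.List.pySetD st.1 j (PySem.List.pyGetD st.1 j 0 + 1),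
              st.2 + (rows - PySem.List.pyGetD st.1 j 0))
        else st
      if ch = "#" then (PySem.List.pySetD st1.1 j (p.1 + 1), st1.2) else st1)
    st

def count_loads (platform : List (List String)) : Int :=
  let rows : Int := platform.length
  let cols : Nat := (PySem.List.pyGetD platform 0 []).length
  ((PySem.List.pyRange 0 rows).foldl
    (fun st i => pvRowBody rows cols st (i, PySem.List.pyGetD platform i []))
    (List.replicate cols 0, 0)).2

-- ===== PORT B =====
-- platform[i][j] for B (same convention as A's pvCell; B keeps its own helper)
def pvCellB (row : List String) (j : Int) : String := PySem.List.pyGetD row j ""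

-- total += c*rows - c*start - c*(c-1)//2  (flush of one free segment), st = (start, c, total)
def pvFlush (rows : Int) (st : Int × Int × Int) : Int :=
  st.2.2 + st.2.1 * rows - st.2.1 * st.1 - PySem.Int.floordiv (st.2.1 * (st.2.1 - 1)) 2

-- one step of B's inner `for i in range(rows)` loop, for one row p = (i, platform[i])
def pvColStep (rows j : Int) (st : Int × Int × Int) (p : Int × List String) : Int × Int × Int :=
  let ch := pvCellB p.2 j
  if ch = "O" then (st.1, st.2.1 + 1, st.2.2)
  else if ch = "#" then (p.1 + 1, 0, pvFlush rows st)
  else st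

def count_loads_alt (platform : List (List String)) : Int :=
  let rows : Int := platform.length
  let cols : Nat := (PySem.List.pyGetD platform 0 []).length
  (PySem.List.pyRange 0 (cols : Int)).foldl
    (fun total j =>
      pvFlush rows ((PySem.List.pyRange 0 rows).foldl
        (fun st i => pvColStep rows j st (i, PySem.List.pyGetD platform i []))
        (0, 0, total)))
    0

-- ===== PRECONDITION & SPEC =====
-- Pre_ excludes exactly the inputs where Python A raises IndexError: the empty platform
-- (len(platform[0])) and platforms with a row shorter than row 0 (platform[i][j]).
def Pre_count_loads (platform : List (List String)) : Prop :=
  platform ≠ [] ∧ ∀ row ∈ platform, (platform.headD []).length ≤ row.length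
instance (platform : List (List String)) : Decidable (Pre_count_loads platform) := by
  unfold Pre_count_loads; infer_instance

def pvWitness_count_loads : List (List String) := [["O", "."], ["#", "O"]]

def Spec_count_loads (platform : List (List String)) (out : Int) : Prop := out = count_loads_alt platform
instance (platform : List (List String)) (out : Int) : Decidable (Spec_count_loads platform out) := by unfold Spec_count_loads; infer_instance

-- ===== CLAIM (what is proved, stated in full; the proofs are below) =====
def Claim_equal_count_loads : Prop := ∀ (platform : List (List String)), Dom_count_loads platform → Pre_count_loads platform → Spec_count_loads platform (count_loads platform)

-- ===== LEMMAS AND PROOFS =====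

-- A's per-column step, abstracted from the floor array: st = (floor_j, loads_j)
def pvColStepA (rows j : Int) (st : Int × Int) (p : Int × List String) : Int × Int :=
  let ch := pvCell p.2 j
  if ch = "O" then (st.1 + 1, st.2 + (rows - st.1))
  else if ch = "#" then (p.1 + 1, st.2) else st

-- what one row does to floor_j and to loads, at column jn
def pvUpd (i : Int) (row : List String) (jn : Nat) (f : Int) : Int :=
  let ch := pvCell row (jn : Int)
  if ch = "O" then f + 1 else if ch = "#" then i + 1 else f

def pvContr (rows : Int) (row : List String) (jn : Nat) (f : Int) : Int :=
  if pvCell row (jn : Int) = "O" then rows - f else 0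

-- A's inner fold, generalised to start at column m (pvRowBody is the m = 0 instance)
def pvInnerFoldFrom (rows i : Int) (row : List String) (m L : Int) (st : List Int × Int) : List Int × Int :=
  (PySem.List.pyRange m L).foldl
    (fun st j =>
      let ch := pvCell row j
      let st1 := if ch = "O"
        then (PySem.List.pySetD st.1 j (PySem.List.pyGetD st.1 j 0 + 1),
              st.2 + (rows - PySem.List.pyGetD st.1 j 0))
        else st
      if ch = "#" then (PySem.List.pySetD st1.1 j (i + 1), st1.2) else st1)
    st

theorem pvCellB_eq (row : List String) (j : Int) : pvCellB row j = pvCell row j := rfl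

theorem pvRowBody_eq_innerFold (rows : Int) (cols : Nat) (st : List Int × Int) (p : Int × List String) :
    pvRowBody rows cols st p = pvInnerFoldFrom rows p.1 p.2 0 (cols : Int) st := rfl

theorem pv_tri (c : Int) :
    PySem.Int.floordiv ((c + 1) * c) 2 = PySem.Int.floordiv (c * (c - 1)) 2 + c := by
  obtain ⟨k, hk⟩ := Int.even_mul_succ_self (c - 1)
  have h1 : c * (c - 1) = 2 * k := by
    have hc : (c - 1) * (c - 1 + 1) = (c - 1) * c := by ring
    rw [hc] at hk
    have := mul_comm (c - 1) c
    linarith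
  rw [show (c + 1) * c = 2 * (k + c) by linarith [h1, show (c+1)*c = c*(c-1) + 2*c from by ring], h1]
  rw [PySem.Int.floordiv_eq_ediv_of_pos (by norm_num), PySem.Int.floordiv_eq_ediv_of_pos (by norm_num)]
  rw [Int.mul_ediv_cancel_left _ (by norm_num), Int.mul_ediv_cancel_left _ (by norm_num)]

theorem pvStepA_add (rows j : Int) (l : List (Int × List String)) :
    ∀ (f a : Int), l.foldl (pvColStepA rows j) (f, a)
      = ((l.foldl (pvColStepA rows j) (f, 0)).1, a + (l.foldl (pvColStepA rows j) (f, 0)).2) := by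
  induction l with
  | nil => intro f a; simp
  | cons p rest ih =>
    intro f a
    simp only [List.foldl_cons, pvColStepA]
    by_cases hO : pvCell p.2 j = "O"
    · simp only [hO, if_pos rfl, if_true, if_neg (show ¬("O" : String) = "#" by decide)]
      rw [ih (f + 1) (a + (rows - f)), ih (f + 1) (0 + (rows - f)), Prod.ext_iff]
      exact ⟨rfl, by ring⟩
    · by_cases hH : pvCell p.2 j = "#"
      · simp only [hH, if_neg (show ¬("#" : String) = "O" by decide), if_pos rfl, if_true]
        rw [ih (p.1 + 1) a, ih (p.1 + 1) 0, Prod.ext_iff]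
        exact ⟨rfl, by ring⟩
      · simp only [if_neg hO, if_neg hH]
        rw [ih f a, ih f 0, Prod.ext_iff]
        exact ⟨rfl, by ring⟩

theorem pvStepB_add (rows j : Int) (l : List (Int × List String)) :
    ∀ (s c t : Int), l.foldl (pvColStep rows j) (s, c, t)
      = ((l.foldl (pvColStep rows j) (s, c, 0)).1, (l.foldl (pvColStep rows j) (s, c, 0)).2.1,
         t + (l.foldl (pvColStep rows j) (s, c, 0)).2.2) := by
  induction l with
  | nil => intro s c t; simp
  | cons p rest ih =>
    intro s c t
    simp only [List.foldl_cons, pvColStep, pvCellB_eq]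
    by_cases hO : pvCell p.2 j = "O"
    · simp only [hO, if_pos rfl, if_true, if_neg (show ¬("O" : String) = "#" by decide)]
      rw [ih s (c + 1) t, ih s (c + 1) 0, Prod.ext_iff, Prod.ext_iff]
      exact ⟨rfl, rfl, by ring⟩
    · by_cases hH : pvCell p.2 j = "#"
      · simp only [hH, if_neg (show ¬("#" : String) = "O" by decide), if_pos rfl, if_true]
        rw [ih (p.1 + 1) 0 (pvFlush rows (s, c, t)), ih (p.1 + 1) 0 (pvFlush rows (s, c, 0)),
            Prod.ext_iff, Prod.ext_iff]
        refine ⟨rfl, rfl, ?_⟩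
        simp only [pvFlush]
        ring
      · simp only [if_neg hO, if_neg hH]
        rw [ih s c t, ih s c 0, Prod.ext_iff, Prod.ext_iff]
        exact ⟨rfl, rfl, by ring⟩

theorem pvFlush_add (rows j : Int) (l : List (Int × List String)) (s c t : Int) :
    pvFlush rows (l.foldl (pvColStep rows j) (s, c, t))
      = t + pvFlush rows (l.foldl (pvColStep rows j) (s, c, 0)) := by
  rw [pvStepB_add rows j l s c t]
  simp only [pvFlush]
  ring

theorem pv_col_equiv (rows j : Int) (l : List (Int × List String)) :
    ∀ (s c t : Int),
      l.foldl (pvColStepA rows j)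
        (s + c, t + c * rows - c * s - PySem.Int.floordiv (c * (c - 1)) 2)
      = ((l.foldl (pvColStep rows j) (s, c, t)).1 + (l.foldl (pvColStep rows j) (s, c, t)).2.1,
         pvFlush rows (l.foldl (pvColStep rows j) (s, c, t))) := by
  induction l with
  | nil => intro s c t; rfl
  | cons p rest ih =>
    intro s c t
    simp only [List.foldl_cons, pvColStepA, pvColStep, pvCellB_eq]
    by_cases hO : pvCell p.2 j = "O"
    · simp only [hO, if_pos rfl, if_true, if_neg (show ¬("O" : String) = "#" by decide)]
      have hst : ((s + c + 1 : Int),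
          (t + c * rows - c * s - PySem.Int.floordiv (c * (c - 1)) 2) + (rows - (s + c)))
          = (s + (c + 1),
             t + (c + 1) * rows - (c + 1) * s - PySem.Int.floordiv ((c + 1) * ((c + 1) - 1)) 2) := by
        rw [Prod.ext_iff]
        refine ⟨by ring, ?_⟩
        rw [show ((c : Int) + 1) * ((c + 1) - 1) = (c + 1) * c from by ring, pv_tri]
        ring
      rw [hst]
      exact ih s (c + 1) t
    · by_cases hH : pvCell p.2 j = "#"
      · simp only [hH, if_neg (show ¬("#" : String) = "O" by decide), if_pos rfl, if_true]
        have hst : ((p.1 + 1 : Int), t + c * rows - c * s - PySem.Int.floordiv (c * (c - 1)) 2)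
            = ((p.1 + 1) + 0,
               pvFlush rows (s, c, t) + 0 * rows - 0 * (p.1 + 1)
                 - PySem.Int.floordiv ((0 : Int) * (0 - 1)) 2) := by
          rw [Prod.ext_iff]
          refine ⟨by ring, ?_⟩
          rw [show ((0 : Int) * (0 - 1)) = 0 from by ring,
              show PySem.Int.floordiv 0 2 = 0 from by decide]
          simp only [pvFlush]
          ring
        rw [hst]
        exact ih (p.1 + 1) 0 (pvFlush rows (s, c, t))
      · simp only [if_neg hO, if_neg hH]
        exact ih s c t

theorem pv_col0 (rows j : Int) (l : List (Int × List String)) :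
    (l.foldl (pvColStepA rows j) (0, 0)).2 = pvFlush rows (l.foldl (pvColStep rows j) (0, 0, 0)) := by
  have h := pv_col_equiv rows j l 0 0 0
  rw [show ((0 : Int) + 0, (0 : Int) + 0 * rows - 0 * 0 - PySem.Int.floordiv ((0 : Int) * (0 - 1)) 2)
        = ((0 : Int), (0 : Int)) from by
      rw [Prod.ext_iff]
      refine ⟨by ring, ?_⟩
      rw [show ((0 : Int) * (0 - 1)) = 0 from by ring,
          show PySem.Int.floordiv 0 2 = 0 from by decide]
      ring] at h
  rw [h]


theorem pv_getD_set_ite (floor : List Int) (m jn : Nat) (v : Int) (hm : m < floor.length) :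
    (floor.set m v).getD jn 0 = if jn = m then v else floor.getD jn 0 := by
  rw [← PySem.List.pyGetD_natCast (floor.set m v) jn 0, ← PySem.List.pySetD_natCast floor m v,
      PySem.List.pyGetD_pySetD_natCast floor m jn v 0 hm, PySem.List.pyGetD_natCast]

theorem pvBody_step (rows i : Int) (row : List String) (m : Nat) (floor : List Int) (loads : Int)
    (hm : m < floor.length) :
    ((fun (st : List Int × Int) (j : Int) =>
      let ch := pvCell row j
      let st1 := if ch = "O"
        then (PySem.List.pySetD st.1 j (PySem.List.pyGetD st.1 j 0 + 1),
              st.2 + (rows - PySem.List.pyGetD st.1 j 0))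
        else st
      if ch = "#" then (PySem.List.pySetD st1.1 j (i + 1), st1.2) else st1)
      (floor, loads) (m : Int))
    = (floor.set m (pvUpd i row m (floor.getD m 0)), loads + pvContr rows row m (floor.getD m 0)) := by
  simp only [pvUpd, pvContr]
  by_cases hO : pvCell row (m : Int) = "O"
  · simp only [hO, if_pos rfl, if_true, if_neg (show ¬("O" : String) = "#" by decide),
      PySem.List.pySetD_natCast, PySem.List.pyGetD_natCast]
  · by_cases hH : pvCell row (m : Int) = "#"
    · simp only [hH, if_neg (show ¬("#" : String) = "O" by decide), if_pos rfl, if_true,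
        PySem.List.pySetD_natCast]
      rw [Prod.ext_iff]
      exact ⟨rfl, by ring⟩
    · simp only [if_neg hO, if_neg hH]
      rw [Prod.ext_iff]
      refine ⟨?_, by ring⟩
      rw [List.getD_eq_getElem floor 0 hm, List.set_getElem_self hm]

theorem pvInner_char (rows i : Int) (row : List String) :
    ∀ (k m : Nat) (floor : List Int) (loads : Int), m + k = floor.length →
      (pvInnerFoldFrom rows i row (m : Int) (floor.length : Int) (floor, loads)).1.length = floor.length ∧
      (∀ jn : Nat, (pvInnerFoldFrom rows i row (m : Int) (floor.length : Int) (floor, loads)).1.getD jn 0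
        = if m ≤ jn ∧ jn < floor.length then pvUpd i row jn (floor.getD jn 0) else floor.getD jn 0) ∧
      (pvInnerFoldFrom rows i row (m : Int) (floor.length : Int) (floor, loads)).2
        = loads + ((List.range' m k).map (fun (jn : Nat) => pvContr rows row jn (floor.getD jn 0))).sum := by
  intro k
  induction k with
  | zero =>
    intro m floor loads hk
    have hm : m = floor.length := by omega
    unfold pvInnerFoldFrom
    rw [PySem.List.pyRange_one_eq_nil (by exact_mod_cast hm.ge)]
    simp only [List.foldl_nil]
    refine ⟨by simp, fun jn => ?_, by simp⟩
    rw [if_neg (by omega)]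
  | succ k ih =>
    intro m floor loads hk
    have hm : m < floor.length := by omega
    have hstep : pvInnerFoldFrom rows i row (m : Int) (floor.length : Int) (floor, loads)
        = pvInnerFoldFrom rows i row ((m + 1 : Nat) : Int) (floor.length : Int)
            (floor.set m (pvUpd i row m (floor.getD m 0)), loads + pvContr rows row m (floor.getD m 0)) := by
      have hcast : ((m : Int) + 1) = ((m + 1 : Nat) : Int) := by push_cast; ring
      unfold pvInnerFoldFrom
      rw [PySem.List.pyRange_one_cons (by exact_mod_cast hm), hcast, List.foldl_cons]
      congr 1
      exact pvBody_step rows i row m floor loads hm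
    set floor1 := floor.set m (pvUpd i row m (floor.getD m 0)) with hfloor1
    have hlen1 : floor1.length = floor.length := List.length_set
    have hget1 : ∀ jn : Nat, floor1.getD jn 0 = if jn = m then pvUpd i row m (floor.getD m 0) else floor.getD jn 0 :=
      fun jn => pv_getD_set_ite floor m jn _ hm
    have ihh := ih (m + 1) floor1 (loads + pvContr rows row m (floor.getD m 0)) (by omega)
    rw [hlen1] at ihh
    rw [hstep]
    refine ⟨ihh.1, fun jn => ?_, ?_⟩
    · rw [ihh.2.1 jn, hget1 jn]
      by_cases hjm : jn = m
      · subst hjm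
        rw [if_neg (by omega), if_pos rfl, if_pos (by omega)]
      · rw [if_neg hjm]
        by_cases hcond : m + 1 ≤ jn ∧ jn < floor.length
        · rw [if_pos hcond, if_pos (by omega)]
        · rw [if_neg hcond, if_neg (by omega)]
    · rw [ihh.2.2, List.range'_succ, List.map_cons, List.sum_cons]
      have hmap : (List.range' (m + 1) k).map (fun (jn : Nat) => pvContr rows row jn (floor1.getD jn 0))
          = (List.range' (m + 1) k).map (fun (jn : Nat) => pvContr rows row jn (floor.getD jn 0)) := by
        refine List.map_congr_left (fun jn hjn => ?_)
        have := List.mem_range'_1.mp hjn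
        rw [hget1 jn, if_neg (by omega)]
      rw [hmap]
      ring


theorem pvRowBody_char (rows : Int) (cols : Nat) (p : Int × List String)
    (floor : List Int) (loads : Int) (hlen : floor.length = cols) :
    (pvRowBody rows cols (floor, loads) p).1.length = cols ∧
    (∀ jn : Nat, (pvRowBody rows cols (floor, loads) p).1.getD jn 0
      = if jn < cols then pvUpd p.1 p.2 jn (floor.getD jn 0) else floor.getD jn 0) ∧
    (pvRowBody rows cols (floor, loads) p).2
      = loads + ((List.range cols).map (fun (jn : Nat) => pvContr rows p.2 jn (floor.getD jn 0))).sum := by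
  subst hlen
  have h := pvInner_char rows p.1 p.2 floor.length 0 floor loads (by omega)
  simp only [Nat.cast_zero] at h
  rw [pvRowBody_eq_innerFold]
  refine ⟨h.1, fun jn => ?_, ?_⟩
  · rw [h.2.1 jn]
    by_cases hc : jn < floor.length
    · rw [if_pos ⟨Nat.zero_le jn, hc⟩, if_pos hc]
    · rw [if_neg (fun hh => hc hh.2), if_neg hc]
  · rw [h.2.2, List.range_eq_range']

theorem pvColStepA_eq (rows : Int) (jn : Nat) (f a : Int) (p : Int × List String) :
    pvColStepA rows (jn : Int) (f, a) p = (pvUpd p.1 p.2 jn f, a + pvContr rows p.2 jn f) := by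
  simp only [pvColStepA, pvUpd, pvContr]
  by_cases hO : pvCell p.2 (jn : Int) = "O"
  · simp only [hO, if_pos rfl, if_true, if_neg (show ¬("O" : String) = "#" by decide)]
  · by_cases hH : pvCell p.2 (jn : Int) = "#"
    · simp only [hH, if_neg (show ¬("#" : String) = "O" by decide), if_pos rfl, if_true]
      rw [Prod.ext_iff]
      exact ⟨rfl, by ring⟩
    · simp only [if_neg hO, if_neg hH]
      rw [Prod.ext_iff]
      exact ⟨rfl, by ring⟩

theorem pvRows_char (rows : Int) (cols : Nat) (l : List (Int × List String)) :
    ∀ (floor : List Int) (loads : Int), floor.length = cols →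
      (l.foldl (pvRowBody rows cols) (floor, loads)).2
        = loads + ((List.range cols).map (fun (jn : Nat) =>
            (l.foldl (pvColStepA rows (jn : Int)) (floor.getD jn 0, 0)).2)).sum := by
  induction l with
  | nil => intro floor loads h; simp
  | cons p rest ih =>
    intro floor loads h
    obtain ⟨h1, h2, h3⟩ := pvRowBody_char rows cols p floor loads h
    simp only [List.foldl_cons]
    rw [show pvRowBody rows cols (floor, loads) p
          = ((pvRowBody rows cols (floor, loads) p).1, (pvRowBody rows cols (floor, loads) p).2) from rfl,
        ih _ _ h1, h3]
    have hmapX : (List.range cols).map (fun (jn : Nat) =>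
          (rest.foldl (pvColStepA rows (jn : Int)) ((pvRowBody rows cols (floor, loads) p).1.getD jn 0, 0)).2)
        = (List.range cols).map (fun (jn : Nat) =>
          (rest.foldl (pvColStepA rows (jn : Int)) (pvUpd p.1 p.2 jn (floor.getD jn 0), 0)).2) := by
      refine List.map_congr_left (fun jn hjn => ?_)
      rw [h2 jn, if_pos (List.mem_range.mp hjn)]
    have hmapR : (List.range cols).map (fun (jn : Nat) =>
          (rest.foldl (pvColStepA rows (jn : Int)) (pvColStepA rows (jn : Int) (floor.getD jn 0, 0) p)).2)
        = (List.range cols).map (fun (jn : Nat) =>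
          pvContr rows p.2 jn (floor.getD jn 0)
            + (rest.foldl (pvColStepA rows (jn : Int)) (pvUpd p.1 p.2 jn (floor.getD jn 0), 0)).2) := by
      refine List.map_congr_left (fun jn _ => ?_)
      rw [pvColStepA_eq rows jn (floor.getD jn 0) 0 p,
          pvStepA_add rows (jn : Int) rest (pvUpd p.1 p.2 jn (floor.getD jn 0))
            (0 + pvContr rows p.2 jn (floor.getD jn 0))]
      show (0 + pvContr rows p.2 jn (floor.getD jn 0)) + _ = _
      ring
    rw [hmapX, hmapR, PySem.List.sum_map_add_int]
    ring

theorem pvA_char (platform : List (List String)) :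
    count_loads platform
      = ((List.range (PySem.List.pyGetD platform 0 []).length).map (fun (jn : Nat) =>
          ((PySem.List.enumerate platform).foldl
            (pvColStepA (platform.length : Int) (jn : Int)) (0, 0)).2)).sum := by
  simp only [count_loads]
  have he : (PySem.List.pyRange 0 ((platform.length : Nat) : Int)).foldl
      (fun st i => pvRowBody (platform.length : Int) (PySem.List.pyGetD platform 0 []).length st
        (i, PySem.List.pyGetD platform i []))
      (List.replicate (PySem.List.pyGetD platform 0 []).length 0, 0)
    = (PySem.List.enumerate platform).foldl
        (pvRowBody (platform.length : Int) (PySem.List.pyGetD platform 0 []).length)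
        (List.replicate (PySem.List.pyGetD platform 0 []).length 0, 0) := by
    rw [PySem.List.enumerate_eq_map_pyRange platform [], List.foldl_map]
    rfl
  rw [he, pvRows_char _ _ _ _ 0 (by simp)]
  rw [show (List.range (PySem.List.pyGetD platform 0 []).length).map (fun (jn : Nat) =>
        ((PySem.List.enumerate platform).foldl (pvColStepA (platform.length : Int) (jn : Int))
          ((List.replicate (PySem.List.pyGetD platform 0 []).length 0).getD jn 0, 0)).2)
      = (List.range (PySem.List.pyGetD platform 0 []).length).map (fun (jn : Nat) =>
        ((PySem.List.enumerate platform).foldl (pvColStepA (platform.length : Int) (jn : Int)) (0, 0)).2)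
    from List.map_congr_left (fun jn hjn => by
      rw [List.getD_replicate 0 (List.mem_range.mp hjn)])]
  ring

theorem pvB_char (platform : List (List String)) :
    count_loads_alt platform
      = ((List.range (PySem.List.pyGetD platform 0 []).length).map (fun (jn : Nat) =>
          pvFlush (platform.length : Int)
            ((PySem.List.enumerate platform).foldl
              (pvColStep (platform.length : Int) (jn : Int)) (0, 0, 0)))).sum := by
  simp only [count_loads_alt]
  have hinner : ∀ (j total : Int),
      (PySem.List.pyRange 0 ((platform.length : Nat) : Int)).foldl
        (fun st i => pvColStep (platform.length : Int) j st (i, PySem.List.pyGetD platform i []))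
        (0, 0, total)
      = (PySem.List.enumerate platform).foldl (pvColStep (platform.length : Int) j) (0, 0, total) := by
    intro j total
    rw [PySem.List.enumerate_eq_map_pyRange platform [], List.foldl_map]
    rfl
  simp only [hinner]
  rw [show (fun (total j : Int) =>
        pvFlush (platform.length : Int)
          ((PySem.List.enumerate platform).foldl (pvColStep (platform.length : Int) j) (0, 0, total)))
      = fun total j => total + pvFlush (platform.length : Int)
          ((PySem.List.enumerate platform).foldl (pvColStep (platform.length : Int) j) (0, 0, 0))
    from funext fun total => funext fun j => pvFlush_add _ j _ 0 0 total]
  rw [PySem.List.foldl_add, PySem.List.pyRange_zero_natCast, List.map_map]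
  rw [zero_add]
  rfl

-- ===== VERDICT (by name: the statement is the Claim_ definition above) =====
theorem count_loads_spec : Claim_equal_count_loads := by
  intro platform _ _
  unfold Spec_count_loads
  rw [pvA_char, pvB_char]
  exact congrArg List.sum (List.map_congr_left (fun jn _ => pv_col0 _ _ _))
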